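-- pv_equiv track=rewrite | github.com/Drizii/Codewars | 6 kyu/Encrypt_this.py | encrypt_this
-- ===== SOURCE A (Python) =====
-- def encrypt_this(text):
--     new_str = ""
--     if len(text) > 1:
--         for t in text.split(" "):
--             new_str += str(ord(t[0]))
--             if len(t) > 2:
--                 new_str += t[-1]
--                 new_str += t[2:-1]
--                 new_str += t[1]
--             elif len(t) == 2:
--                 new_str += t[-1]
--             new_str += " "
--     return new_str[0:-1]
-- ===== SOURCE B (Python) =====
-- def _order(n):
--     # positions of the tail characters in encrypted order: last, middle..., second
--     return [n - 1, *range(2, n - 1), 1] if n > 2 else list(range(1, n))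
--
-- def encrypt_this(text):
--     if len(text) <= 1:
--         return ""
--     out = []
--     word = []
--     for c in text + " ":
--         if c == " ":
--             out.append(str(ord(word[0])) + "".join(word[k] for k in _order(len(word))))
--             word = []
--         else:
--             word.append(c)
--     return " ".join(out)
-- ===== Notes on version B (the rewrite author's own statement) =====
-- stated objective: alternative
-- what changed: B makes a single character-level pass with a word buffer flushed at each space (plus one sentinel space), gathers each word's tail by an index permutation, and joins with str.join, instead of A's split into words, per-word slice concatenation, and trailing-space trim.
import Mathlib
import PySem

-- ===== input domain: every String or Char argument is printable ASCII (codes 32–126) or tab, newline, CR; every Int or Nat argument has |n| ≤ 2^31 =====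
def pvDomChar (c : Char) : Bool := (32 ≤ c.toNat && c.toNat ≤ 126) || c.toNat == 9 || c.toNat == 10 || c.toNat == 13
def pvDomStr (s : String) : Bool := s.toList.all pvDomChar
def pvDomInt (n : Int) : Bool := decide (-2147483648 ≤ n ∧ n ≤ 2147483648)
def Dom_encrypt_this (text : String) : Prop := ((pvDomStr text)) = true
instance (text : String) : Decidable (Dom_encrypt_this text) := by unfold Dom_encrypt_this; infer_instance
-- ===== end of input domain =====

-- B replaces A's split/slice-concatenation/trailing-space-trim with a single character-level pass
-- (a word buffer flushed at each space, one sentinel space) that gathers each word's tail by an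
-- index permutation and joins the results (objective: alternative).

-- ===== PORT A =====
-- literal transliteration of A: accumulate str(ord(t[0])) + slices + " " per word, then new_str[0:-1]
def encrypt_this (text : String) : String :=
  let new_str : List Char := []
  let new_str :=
    if PySem.Str.len text > 1 then
      (PySem.Chars.splitOn text.toList [' ']).foldl
        (fun ns t =>
          let ns := ns ++ PySem.Int.toChars ((PySem.List.pyGetD t 0 ' ').toNat : Int)  -- t[0] raises on empty t: excluded by Pre_
          let ns :=
            if PySem.List.len t > 2 then
              ((ns ++ [PySem.List.pyGetD t (-1) ' '])
                ++ PySem.List.slice t (some 2) (some (-1)))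
                ++ [PySem.List.pyGetD t 1 ' ']
            else if PySem.List.len t = 2 then
              ns ++ [PySem.List.pyGetD t (-1) ' ']
            else ns
          ns ++ [' ']) new_str
    else new_str
  String.mk (PySem.List.slice new_str (some 0) (some (-1)))

-- ===== PORT B =====
-- _order(n) of Source B: [n - 1, *range(2, n - 1), 1] if n > 2 else list(range(1, n))
def pvOrder (n : Nat) : List Int :=
  if 2 < n then ((n : Int) - 1) :: (PySem.List.pyRange 2 ((n : Int) - 1) 1 ++ [1])
  else PySem.List.pyRange 1 (n : Int) 1

-- str(ord(word[0])) + "".join(word[k] for k in _order(len(word)))   (word[0] raises on empty word: excluded by Pre_)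
def pvEncWordB (w : List Char) : List Char :=
  PySem.Int.toChars ((PySem.List.pyGetD w 0 ' ').toNat : Int)
    ++ (pvOrder w.length).map (fun k => PySem.List.pyGetD w k ' ')

-- one step of Source B's character loop: state = (out, word)
def pvStepB (st : List (List Char) × List Char) (c : Char) : List (List Char) × List Char :=
  if c = ' ' then (st.1 ++ [pvEncWordB st.2], []) else (st.1, st.2 ++ [c])

def encrypt_this_alt (text : String) : String :=
  if PySem.Str.len text ≤ 1 then ""
  else String.mk (PySem.Chars.join [' '] (((text.toList ++ [' ']).foldl pvStepB ([], [])).1))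

-- ===== PRECONDITION & SPEC =====
-- Pre_ excludes exactly the inputs where A raises IndexError (t[0] on an empty word produced
-- by the split when the guard len(text) > 1 admits the input); B raises there too.
def Pre_encrypt_this (text : String) : Prop :=
  PySem.Str.len text ≤ 1 ∨ ∀ w ∈ PySem.Chars.splitOn text.toList [' '], w ≠ []
instance (text : String) : Decidable (Pre_encrypt_this text) := by unfold Pre_encrypt_this; infer_instance

def pvWitness_encrypt_this : String := "A wise old owl"

def Spec_encrypt_this (text : String) (out : String) : Prop := out = encrypt_this_alt text
instance (text : String) (out : String) : Decidable (Spec_encrypt_this text out) := by unfold Spec_encrypt_this; infer_instance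

-- ===== CLAIM (what is proved, stated in full; the proofs are below) =====
def Claim_equal_encrypt_this : Prop := ∀ (text : String), Dom_encrypt_this text → Pre_encrypt_this text → Spec_encrypt_this text (encrypt_this text)

-- ===== LEMMAS AND PROOFS =====

-- the single-char-separator split, with the current word accumulated in reverse
def pvSplit (cur : List Char) : List Char → List (List Char)
  | [] => [cur.reverse]
  | c :: rest => if c = ' ' then cur.reverse :: pvSplit [] rest else pvSplit (c :: cur) rest

-- A's per-word contribution (minus the trailing space), as a function of the word
def pvEncWordA (t : List Char) : List Char :=
  PySem.Int.toChars ((PySem.List.pyGetD t 0 ' ').toNat : Int) ++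
    (if PySem.List.len t > 2 then
      [PySem.List.pyGetD t (-1) ' '] ++ PySem.List.slice t (some 2) (some (-1))
        ++ [PySem.List.pyGetD t 1 ' ']
    else if PySem.List.len t = 2 then [PySem.List.pyGetD t (-1) ' ']
    else [])

lemma pv_go_eq (l : List Char) : ∀ (fuel : Nat) (cur : List Char) (acc : List (List Char)),
    l.length ≤ fuel →
    PySem.Chars.splitOn.go [' '] fuel l cur acc = acc.reverse ++ pvSplit cur l := by
  induction l with
  | nil =>
      intro fuel cur acc _
      cases fuel <;> simp [PySem.Chars.splitOn.go, pvSplit]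
  | cons c rest ih =>
      intro fuel cur acc hf
      cases fuel with
      | zero => simp at hf
      | succ f =>
          by_cases hc : c = ' '
          · subst hc
            rw [show PySem.Chars.splitOn.go [' '] (f+1) (' ' :: rest) cur acc
                  = PySem.Chars.splitOn.go [' '] f rest [] (cur.reverse :: acc) from by
                simp [PySem.Chars.splitOn.go, List.isPrefixOf]]
            rw [ih f [] (cur.reverse :: acc) (by simpa using hf)]
            simp [pvSplit]
          · have hc' : ¬ (' ' = c) := fun h => hc (Eq.symm h)
            rw [show PySem.Chars.splitOn.go [' '] (f+1) (c :: rest) cur acc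
                  = PySem.Chars.splitOn.go [' '] f rest (c :: cur) acc from by
                simp [PySem.Chars.splitOn.go, List.isPrefixOf, hc']]
            rw [ih f (c :: cur) acc (by simpa using hf)]
            simp [pvSplit, hc]

lemma pv_splitOn_eq (l : List Char) : PySem.Chars.splitOn l [' '] = pvSplit [] l := by
  rw [show PySem.Chars.splitOn l [' '] = PySem.Chars.splitOn.go [' '] (l.length + 1) l [] [] from rfl,
      pv_go_eq l (l.length + 1) [] [] (by omega)]
  simp

-- Source B's loop over text + " " computes the encrypted words of the split
lemma pv_foldlB (l : List Char) : ∀ (out : List (List Char)) (word : List Char),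
    (l ++ [' ']).foldl pvStepB (out, word)
      = (out ++ (pvSplit word.reverse l).map pvEncWordB, []) := by
  induction l with
  | nil => intro out word; simp [pvStepB, pvSplit]
  | cons c rest ih =>
      intro out word
      by_cases hc : c = ' '
      · subst hc
        simp only [List.cons_append, List.foldl_cons]
        rw [show pvStepB (out, word) ' ' = (out ++ [pvEncWordB word], []) from by simp [pvStepB],
            ih (out ++ [pvEncWordB word]) []]
        simp [pvSplit]
      · simp only [List.cons_append, List.foldl_cons, pvStepB, if_neg hc]
        rw [ih out (word ++ [c])]
        simp [pvSplit, hc]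

-- map of pyGetD over a unit range gathers a contiguous segment
lemma pv_map_pyGetD_range (w : List Char) (a b : Nat) (hb : b ≤ w.length) :
    (PySem.List.pyRange (a : Int) (b : Int) 1).map (fun k => PySem.List.pyGetD w k ' ')
      = (w.take b).drop a := by
  rw [PySem.List.pyRange_one, show ((b : Int) - (a : Int)).toNat = b - a by omega]
  apply List.ext_getElem
  · simp; omega
  · intro i h1 h2
    simp only [List.getElem_map, List.getElem_range, List.getElem_drop, List.getElem_take]
    rw [show ((a : Int) + (i : Int)) = ((a + i : Nat) : Int) by push_cast; ring,
        PySem.List.pyGetD_natCast]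
    have hlt : a + i < w.length := by simp at h1; omega
    simp [List.getD_eq_getElem?_getD, List.getElem?_eq_getElem hlt]

-- helper: [2:-1] of c :: d :: mid ++ [z] is mid
lemma pv_slice_two_neg_one (c d z : Char) (mid : List Char) :
    PySem.List.slice (c :: d :: (mid ++ [z])) (some 2) (some (-1)) = mid := by
  simp [PySem.List.slice, PySem.List.clampIdx]
  have : (if (mid.length : Int) + 1 + 1 < 0 then 0 else ((mid.length : Int) + 1 + 1).toNat) - 2 = mid.length := by
    split_ifs <;> omega
  rw [this, List.take_append_of_le_length (le_refl _), List.take_length]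

-- per-word, length ≥ 3: A's slice concatenation equals B's index-permutation gather
lemma pv_word_eq_long (c d z : Char) (mid : List Char) :
    pvEncWordA (c :: d :: (mid ++ [z])) = pvEncWordB (c :: d :: (mid ++ [z])) := by
  have hn : (c :: d :: (mid ++ [z])).length = mid.length + 3 := by simp
  have hneg : PySem.List.pyGetD (c :: d :: (mid ++ [z])) (-1) ' ' = z := by
    rw [show c :: d :: (mid ++ [z]) = (c :: d :: mid) ++ [z] by simp,
        PySem.List.pyGetD_neg_one_append_singleton]
  unfold pvEncWordA pvEncWordB pvOrder
  rw [hn, if_pos (by omega : 2 < mid.length + 3),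
      if_pos (by simp [PySem.List.len_eq]; omega :
        PySem.List.len (c :: d :: (mid ++ [z])) > 2)]
  rw [List.map_cons, List.map_append, List.map_singleton]
  congr 1
  rw [hneg, pv_slice_two_neg_one]
  have hz : PySem.List.pyGetD (c :: d :: (mid ++ [z]))
      ((mid.length : Int) + 3 - 1) ' ' = z := by
    rw [show (mid.length : Int) + 3 - 1 = ((mid.length + 2 : Nat) : Int) by push_cast; ring,
        PySem.List.pyGetD_natCast]
    rw [show c :: d :: (mid ++ [z]) = (c :: d :: mid) ++ [z] by simp]
    simp [List.getD_eq_getElem?_getD, List.length_cons]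
  have hmid : (PySem.List.pyRange 2 ((mid.length : Int) + 3 - 1) 1).map
      (fun k => PySem.List.pyGetD (c :: d :: (mid ++ [z])) k ' ') = mid := by
    rw [show (2 : Int) = ((2 : Nat) : Int) from rfl,
        show (mid.length : Int) + 3 - 1 = ((mid.length + 2 : Nat) : Int) by push_cast; ring,
        pv_map_pyGetD_range _ 2 (mid.length + 2) (by simp)]
    rw [show c :: d :: (mid ++ [z]) = (c :: d :: mid) ++ [z] by simp,
        List.take_append_of_le_length (by simp), List.take_of_length_le (by simp)]
    simp
  push_cast
  rw [hz, hmid]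
  simp

-- per-word: A's contribution equals B's encrypted word, for every word
lemma pv_word_eq (w : List Char) : pvEncWordA w = pvEncWordB w := by
  match w with
  | [] =>
      simp [pvEncWordA, pvEncWordB, pvOrder, PySem.List.len,
            PySem.List.pyRange_one_eq_nil]
  | [c] =>
      simp [pvEncWordA, pvEncWordB, pvOrder, PySem.List.len,
            PySem.List.pyRange_one_eq_nil]
  | [c, d] =>
      unfold pvEncWordA pvEncWordB pvOrder
      rw [show ([c, d] : List Char).length = 2 from rfl]
      push_cast
      rw [show PySem.List.pyRange 1 2 1 = [1] from by decide]
      simp [PySem.List.len, PySem.List.pyGetD,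
            PySem.List.pyGet?, PySem.List.pyIdx?]
  | c :: d :: e :: more =>
      have h : e :: more = (e :: more).dropLast ++ [(e :: more).getLast (by simp)] :=
        (List.dropLast_append_getLast (by simp)).symm
      rw [show (c :: d :: e :: more)
            = c :: d :: ((e :: more).dropLast ++ [(e :: more).getLast (by simp)]) by rw [← h]]
      exact pv_word_eq_long _ _ _ _

-- A's whole loop as a flatMap
lemma pv_foldl (ws : List (List Char)) (acc : List Char) :
    ws.foldl
      (fun ns t =>
        let ns := ns ++ PySem.Int.toChars ((PySem.List.pyGetD t 0 ' ').toNat : Int)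
        let ns :=
          if PySem.List.len t > 2 then
            ((ns ++ [PySem.List.pyGetD t (-1) ' ']) ++ PySem.List.slice t (some 2) (some (-1)))
              ++ [PySem.List.pyGetD t 1 ' ']
          else if PySem.List.len t = 2 then ns ++ [PySem.List.pyGetD t (-1) ' ']
          else ns
        ns ++ [' ']) acc
      = acc ++ ws.flatMap (fun t => pvEncWordA t ++ [' ']) := by
  rw [show (fun (ns t : List Char) =>
        let ns := ns ++ PySem.Int.toChars ((PySem.List.pyGetD t 0 ' ').toNat : Int)
        let ns :=
          if PySem.List.len t > 2 then
            ((ns ++ [PySem.List.pyGetD t (-1) ' ']) ++ PySem.List.slice t (some 2) (some (-1)))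
              ++ [PySem.List.pyGetD t 1 ' ']
          else if PySem.List.len t = 2 then ns ++ [PySem.List.pyGetD t (-1) ' ']
          else ns
        ns ++ [' ']) = fun ns t => ns ++ (pvEncWordA t ++ [' '])
      from funext fun ns => funext fun t => by
        simp only [pvEncWordA]; split_ifs <;> simp]
  exact PySem.List.foldl_append_eq_flatMap _ ws acc

-- drop the final space vs " ".join
lemma pv_dropLast_join (ws : List (List Char)) :
    (ws.flatMap (fun t => pvEncWordB t ++ [' '])).dropLast
      = PySem.Chars.join [' '] (ws.map pvEncWordB) := by
  induction ws with
  | nil => simp [PySem.Chars.join_nil]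
  | cons t ws ih =>
    cases ws with
    | nil => simp [PySem.Chars.join_singleton]
    | cons u vs =>
      rw [List.map_cons, List.map_cons, PySem.Chars.join_cons_cons, ← List.map_cons,
          List.flatMap_cons,
          List.dropLast_append_of_ne_nil (by simp [List.flatMap_cons]), ih]

-- ===== VERDICT (by name: the statement is the Claim_ definition above) =====
theorem encrypt_this_spec : Claim_equal_encrypt_this := by
  intro text _ _
  unfold Spec_encrypt_this encrypt_this encrypt_this_alt
  dsimp only
  by_cases h : PySem.Str.len text ≤ 1
  · rw [if_neg (show ¬ PySem.Str.len text > 1 by omega), if_pos h]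
    simp [PySem.List.slice_zero_start, PySem.List.slice_to_neg_one]
    rfl
  · rw [if_pos (show PySem.Str.len text > 1 by omega), if_neg h, pv_foldl, List.nil_append,
        PySem.List.slice_zero_start, PySem.List.slice_to_neg_one, pv_foldlB]
    have hflat : (PySem.Chars.splitOn text.toList [' ']).flatMap (fun t => pvEncWordA t ++ [' '])
        = (PySem.Chars.splitOn text.toList [' ']).flatMap (fun t => pvEncWordB t ++ [' ']) := by
      simp only [List.flatMap_def]
      exact congrArg List.flatten (List.map_congr_left fun w _ => by rw [pv_word_eq w])
    rw [hflat, pv_dropLast_join, pv_splitOn_eq]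
    simp
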